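-- pv_equiv track=rewrite | github.com/DhruvArvindSingh/SIH | apps/fast-server/detection_code/streetlight_detector.py | get_simple_priority
-- ===== SOURCE A (Python) =====
-- def get_simple_priority(detection_details, img_area):
--     """
--     Calculate maintenance priority based on detection size and count
--
--     Args:
--         detection_details (list): List of detection dictionaries
--         img_area (float): Image area in pixels
--
--     Returns:
--         str: Priority level ('high', 'medium', 'low')
--     """
--     if not detection_details:
--         return 'low'
--
--     high_count = sum(1 for d in detection_details if d['size_category'] == 'high')
--     medium_count = sum(1 for d in detection_details if d['size_category'] == 'medium')
--     low_count = sum(1 for d in detection_details if d['size_category'] == 'low')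
--
--     # Priority logic for streetlight infrastructure
--     if high_count > 0:
--         return 'high'  # Critical - immediate maintenance
--     elif medium_count >= 2:
--         return 'high'  # Multiple failures - urgent
--     elif medium_count > 0 or low_count > 3:
--         return 'medium'  # Significant issues - scheduled
--     else:
--         return 'low'  # Minor issues - routine
-- ===== SOURCE B (Python) =====
-- def get_simple_priority(detection_details, img_area):
--     # Early-exit scan: decide 'high' the moment it is certain (first 'high'
--     # detection, or second 'medium'); only a capped medium flag and a low
--     # tally survive to the end.
--     mediums = 0
--     lows = 0
--     for d in detection_details:
--         c = d['size_category']
--         if c == 'high':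
--             return 'high'
--         if c == 'medium':
--             mediums += 1
--             if mediums == 2:
--                 return 'high'
--         elif c == 'low':
--             lows += 1
--     if mediums > 0 or lows > 3:
--         return 'medium'
--     return 'low'
-- ===== Notes on version B (the rewrite author's own statement) =====
-- stated objective: alternative
-- what changed: Replaces A's count-everything-then-cascade (three full counting passes plus a final threshold cascade) by a single early-terminating scan that returns 'high' as soon as the decision is forced (first 'high' or second 'medium') and never computes a high count at all; only a medium tally (at most 1 at loop end) and a low tally reach the residual medium/low decision.
import Mathlib
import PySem

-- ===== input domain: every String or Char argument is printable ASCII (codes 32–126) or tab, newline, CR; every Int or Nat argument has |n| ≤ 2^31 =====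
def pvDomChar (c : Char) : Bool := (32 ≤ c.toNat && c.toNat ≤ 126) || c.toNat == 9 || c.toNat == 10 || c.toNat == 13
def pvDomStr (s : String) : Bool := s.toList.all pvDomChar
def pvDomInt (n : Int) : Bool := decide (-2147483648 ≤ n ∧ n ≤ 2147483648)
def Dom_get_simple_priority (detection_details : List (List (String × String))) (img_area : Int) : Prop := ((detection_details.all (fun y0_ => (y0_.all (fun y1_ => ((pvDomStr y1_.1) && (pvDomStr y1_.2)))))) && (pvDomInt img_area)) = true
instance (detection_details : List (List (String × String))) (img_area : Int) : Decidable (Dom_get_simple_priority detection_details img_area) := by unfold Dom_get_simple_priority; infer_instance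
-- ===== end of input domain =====

-- One honest line: B replaces A's three counting passes plus final cascade by a single
-- early-terminating scan that returns 'high' as soon as the decision is forced (objective: alternative).

-- d['size_category'] : first matching value; Pre_ guarantees the key is present (else Python raises KeyError)
def pvGetCat (d : List (String × String)) : String :=
  ((d.find? (fun p => p.1 == "size_category")).map (·.2)).getD ""

-- ===== PORT A =====
def get_simple_priority (detection_details : List (List (String × String))) (img_area : Int) : String :=
  if detection_details = [] then "low"
  else
    let high_count : Nat := detection_details.countP (fun d => pvGetCat d == "high")
    let medium_count : Nat := detection_details.countP (fun d => pvGetCat d == "medium")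
    let low_count : Nat := detection_details.countP (fun d => pvGetCat d == "low")
    if high_count > 0 then "high"
    else if medium_count ≥ 2 then "high"
    else if medium_count > 0 || low_count > 3 then "medium"
    else "low"

-- ===== PORT B =====
-- the early-exit loop of Source B, as structural recursion on the list with the two counters as state
def pvScanB : List (List (String × String)) → Nat → Nat → String
  | [], mediums, lows => if mediums > 0 || lows > 3 then "medium" else "low"
  | d :: tl, mediums, lows =>
    let c := pvGetCat d
    if c == "high" then "high"
    else if c == "medium" then
      if mediums + 1 == 2 then "high" else pvScanB tl (mediums + 1) lows
    else if c == "low" then pvScanB tl mediums (lows + 1)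
    else pvScanB tl mediums lows

def get_simple_priority_alt (detection_details : List (List (String × String))) (img_area : Int) : String :=
  pvScanB detection_details 0 0

-- ===== PRECONDITION & SPEC =====
-- Pre_ excludes exactly the inputs where Python A raises KeyError: a dict without 'size_category'.
def Pre_get_simple_priority (detection_details : List (List (String × String))) (img_area : Int) : Prop :=
  (detection_details.all (fun d => (d.find? (fun p => p.1 == "size_category")).isSome)) = true
instance (detection_details : List (List (String × String))) (img_area : Int) : Decidable (Pre_get_simple_priority detection_details img_area) := by unfold Pre_get_simple_priority; infer_instance

def pvWitness_get_simple_priority : (List (List (String × String))) × Int :=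
  ([[("size_category", "medium")], [("size_category", "low")]], 100)

def Spec_get_simple_priority (detection_details : List (List (String × String))) (img_area : Int) (out : String) : Prop := out = get_simple_priority_alt detection_details img_area
instance (detection_details : List (List (String × String))) (img_area : Int) (out : String) : Decidable (Spec_get_simple_priority detection_details img_area out) := by unfold Spec_get_simple_priority; infer_instance

-- ===== CLAIM (what is proved, stated in full; the proofs are below) =====
def Claim_equal_get_simple_priority : Prop := ∀ (detection_details : List (List (String × String))) (img_area : Int), Dom_get_simple_priority detection_details img_area → Pre_get_simple_priority detection_details img_area → Spec_get_simple_priority detection_details img_area (get_simple_priority detection_details img_area)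

-- ===== LEMMAS AND PROOFS =====

-- the early-exit scan equals A's cascade over the remaining counts, for any state with mediums ≤ 1
theorem scanB_eq (dd : List (List (String × String))) (m l : Nat) (hm : m ≤ 1) :
    pvScanB dd m l =
      (if dd.countP (fun d => pvGetCat d == "high") > 0 then "high"
       else if m + dd.countP (fun d => pvGetCat d == "medium") ≥ 2 then "high"
       else if m + dd.countP (fun d => pvGetCat d == "medium") > 0
              || l + dd.countP (fun d => pvGetCat d == "low") > 3 then "medium"
       else "low") := by
  induction dd generalizing m l with
  | nil =>
    simp only [pvScanB, List.countP_nil]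
    split_ifs <;> simp_all <;> omega
  | cons d tl ih =>
    simp only [pvScanB, List.countP_cons]
    by_cases h1 : pvGetCat d == "high"
    · simp [h1]
    · have e1 : (pvGetCat d == "high") = false := by simp_all
      by_cases h2 : pvGetCat d == "medium"
      · have e3 : (pvGetCat d == "low") = false := by simp_all [beq_iff_eq]
        by_cases hm1 : m + 1 = 2
        · have hm' : m = 1 := by omega
          subst hm'
          have he : ((1 + 1 : Nat) == 2) = true := by decide
          simp only [e1, h2, e3, he, Bool.false_eq_true, if_false, if_true]
          split_ifs <;> first | rfl | (simp only [Bool.or_eq_true, decide_eq_true_eq, not_or, not_lt] at *; omega)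
        · have hm0 : m = 0 := by omega
          subst hm0
          have hne : ((0 + 1 : Nat) == 2) = false := by decide
          simp only [e1, h2, e3, hne, Bool.false_eq_true, if_false, if_true]
          rw [ih 1 l (by omega)]
          split_ifs <;> first | rfl | (simp only [Bool.or_eq_true, decide_eq_true_eq, not_or, not_lt] at *; omega)
      · have e2 : (pvGetCat d == "medium") = false := by simp_all
        by_cases h3 : pvGetCat d == "low"
        · simp only [e1, e2, h3, Bool.false_eq_true, if_false, if_true]
          rw [ih m (l + 1) hm]
          split_ifs <;> first | rfl | (simp only [Bool.or_eq_true, decide_eq_true_eq, not_or, not_lt] at *; omega)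
        · have e3 : (pvGetCat d == "low") = false := by simp_all
          simp only [e1, e2, e3, Bool.false_eq_true, if_false]
          rw [ih m l hm]
          split_ifs <;> first | rfl | (simp only [Bool.or_eq_true, decide_eq_true_eq, not_or, not_lt] at *; omega)

-- ===== VERDICT (by name: the statement is the Claim_ definition above) =====
theorem get_simple_priority_spec : Claim_equal_get_simple_priority := by
  intro dd img _ _
  unfold Spec_get_simple_priority get_simple_priority get_simple_priority_alt
  rw [scanB_eq dd 0 0 (by omega)]
  rcases dd with _ | ⟨d, tl⟩
  · simp
  · rw [if_neg (by simp)]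
    simp only [Nat.zero_add]
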